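-- pv_equiv track=rewrite | github.com/Gwonwoo-Nam/Algorithm-BaekJoon | #17626 Four Squares/Four Squares.py | checkTriple
-- ===== SOURCE A (Python) =====
-- def checkTriple(n) :
--     for i in range (1,230) :
--         for j in range (1,230) :
--             for k in range (1,230) :
--                 if i*i + j*j + k*k == n :
--                     return True
--             k = 1
--         j = 1
--     return False
-- ===== SOURCE B (Python) =====
-- def checkTriple(n):
--     squares = {k * k for k in range(1, 230)}
--     return any((n - i * i - j * j) in squares
--                for i in range(1, 230) for j in range(1, 230))
-- ===== Notes on version B (the rewrite author's own statement) =====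
-- stated objective: faster
-- what changed: Replaced the innermost k-loop by a membership test of the remainder n-i*i-j*j in a precomputed set of squares, turning the triple loop into a double loop.
import Mathlib
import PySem

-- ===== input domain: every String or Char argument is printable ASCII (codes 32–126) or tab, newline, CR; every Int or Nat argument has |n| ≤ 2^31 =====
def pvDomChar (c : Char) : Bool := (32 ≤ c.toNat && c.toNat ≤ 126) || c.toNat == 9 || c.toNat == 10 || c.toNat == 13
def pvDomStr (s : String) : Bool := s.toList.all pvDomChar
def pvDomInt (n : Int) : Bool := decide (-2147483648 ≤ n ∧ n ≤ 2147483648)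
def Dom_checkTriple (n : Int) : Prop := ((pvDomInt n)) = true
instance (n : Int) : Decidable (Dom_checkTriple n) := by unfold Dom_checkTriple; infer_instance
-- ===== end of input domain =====

-- B replaces A's innermost loop by a membership test in a precomputed set of squares .

-- ===== PORT A =====
-- triple loop with early 'return True' = nested .any over the three ranges
def checkTriple (n : Int) : Bool :=
  (PySem.List.pyRange 1 230 1).any fun i =>
    (PySem.List.pyRange 1 230 1).any fun j =>
      (PySem.List.pyRange 1 230 1).any fun k =>
        i * i + j * j + k * k == n

-- ===== PORT B =====
-- squares = {k*k for k in range(1,230)}; any(... in squares ...)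
def checkTriple_alt (n : Int) : Bool :=
  let squares : PySem.Set Int :=
    PySem.Set.ofList ((PySem.List.pyRange 1 230 1).map fun k => k * k)
  (PySem.List.pyRange 1 230 1).any fun i =>
    (PySem.List.pyRange 1 230 1).any fun j =>
      PySem.Set.contains squares (n - i * i - j * j)

-- ===== PRECONDITION & SPEC =====
def Spec_checkTriple (n : Int) (out : Bool) : Prop := out = checkTriple_alt n
instance (n : Int) (out : Bool) : Decidable (Spec_checkTriple n out) := by unfold Spec_checkTriple; infer_instance

-- ===== CLAIM (what is proved, stated in full; the proofs are below) =====
def Claim_equal_checkTriple : Prop := ∀ (n : Int), Dom_checkTriple n → Spec_checkTriple n (checkTriple n)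

-- ===== LEMMAS AND PROOFS =====

-- for fixed i, j the inner k-loop of A equals B's membership test
theorem inner_loop_eq_contains (n i j : Int) :
    ((PySem.List.pyRange 1 230 1).any fun k => i * i + j * j + k * k == n)
      = PySem.Set.contains
          (PySem.Set.ofList ((PySem.List.pyRange 1 230 1).map fun k => k * k))
          (n - i * i - j * j) := by
  rw [Bool.eq_iff_iff]
  simp only [List.any_eq_true, PySem.Set.contains_iff, PySem.Set.mem_ofList, List.mem_map,
    beq_iff_eq]
  constructor
  · rintro ⟨k, hk, h⟩
    exact ⟨k, hk, by omega⟩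
  · rintro ⟨k, hk, h⟩
    exact ⟨k, hk, by omega⟩

-- ===== VERDICT (by name: the statement is the Claim_ definition above) =====
theorem checkTriple_spec : Claim_equal_checkTriple := by
  intro n _
  unfold Spec_checkTriple checkTriple checkTriple_alt
  refine PySem.List.any_congr_mem fun i _ => ?_
  refine PySem.List.any_congr_mem fun j _ => ?_
  exact inner_loop_eq_contains n i j
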